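-- pv_equiv track=rewrite | github.com/hdeps/hdeps | hdeps/projects.py | convert_sdist_requires
-- ===== SOURCE A (Python) =====
-- from typing import Dict, Iterable, List, Optional, Sequence, Set, Tuple, TypeVar, Union
--
-- def convert_sdist_requires(data: str) -> Tuple[List[str], Set[str]]:
--     # This is reverse engineered from looking at a couple examples, but there
--     # does not appear to be a formal spec.  Mentioned at
--     # https://setuptools.readthedocs.io/en/latest/formats.html#requires-txt
--     current_markers = None
--     extras: Set[str] = set()
--     lst: List[str] = []
--     for line in data.splitlines():
--         line = line.strip()
--         if not line:
--             continue
--         elif line[:1] == "[" and line[-1:] == "]":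
--             current_markers = line[1:-1]
--             if ":" in current_markers:
--                 # absl-py==0.9.0 and requests==2.22.0 are good examples of this
--                 extra, markers = current_markers.split(":", 1)
--                 if extra:
--                     extras.add(extra)
--                     current_markers = f"({markers}) and extra == {extra!r}"
--                 else:
--                     current_markers = markers
--             else:
--                 # this is an extras_require
--                 current_markers = f"extra == {current_markers!r}"
--         else:
--             if current_markers:
--                 lst.append(f"{line}; {current_markers}")
--             else:
--                 lst.append(line)
--     return lst, extras
-- ===== SOURCE B (Python) =====
-- def _section_marker(header):
--     """Pure marker computation for one `[...]` header: returns (markers, extra-or-None)."""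
--     if ":" in header:
--         extra, markers = header.split(":", 1)
--         if extra:
--             return f"({markers}) and extra == {extra!r}", extra
--         return markers, None
--     return f"extra == {header!r}", None
--
--
-- def convert_sdist_requires(data):
--     # Phase 1: split the stripped non-empty lines into a preamble and (header, body) sections.
--     lines = [s for s in (raw.strip() for raw in data.splitlines()) if s]
--     preamble, sections = [], []
--     header, body = None, []
--     for ln in lines:
--         if ln.startswith("[") and ln.endswith("]"):
--             if header is not None:
--                 sections.append((header, body))
--             header, body = ln[1:-1], []
--         elif header is None:
--             preamble.append(ln)
--         else:
--             body.append(ln)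
--     if header is not None:
--         sections.append((header, body))
--     # Phase 2: emit preamble verbatim, then each section's body with its marker suffix.
--     lst = list(preamble)
--     extras = set()
--     for h, b in sections:
--         markers, extra = _section_marker(h)
--         if extra is not None:
--             extras.add(extra)
--         lst.extend(f"{ln}; {markers}" if markers else ln for ln in b)
--     return lst, extras
-- ===== Notes on version B (the rewrite author's own statement) =====
-- stated objective: alternative
-- what changed: Replaces A's single-pass state machine (a current_markers register mutated while emitting) by a two-phase decomposition: phase 1 structurally splits the stripped non-empty lines into a preamble plus (header, body-lines) sections, phase 2 computes each section's marker/extra purely and emits its body.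
import Mathlib
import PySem

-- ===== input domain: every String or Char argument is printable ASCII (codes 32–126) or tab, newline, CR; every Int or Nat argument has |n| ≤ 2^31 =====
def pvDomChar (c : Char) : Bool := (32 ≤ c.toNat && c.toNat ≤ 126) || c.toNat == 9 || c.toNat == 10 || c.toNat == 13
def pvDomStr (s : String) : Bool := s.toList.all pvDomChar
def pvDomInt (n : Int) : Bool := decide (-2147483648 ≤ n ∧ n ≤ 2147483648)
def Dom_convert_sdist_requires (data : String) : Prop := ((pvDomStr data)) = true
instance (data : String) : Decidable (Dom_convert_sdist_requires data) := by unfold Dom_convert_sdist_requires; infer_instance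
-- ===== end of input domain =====

-- B re-implements A as two phases (split lines into preamble + (header, body) sections, then emit);
-- objective: alternative decomposition, same cost. Return values only (A mutates nothing).

-- ===== PORT A =====
-- Python repr(s) for str, exact for ASCII 32–126 plus tab (the only characters reaching it here:
-- headers come from stripped lines of splitlines, so no '\n'/'\r'). Used by both ports (both use f"{...!r}").
def pyReprChars (cs : List Char) : List Char :=
  let q : Char := if '\'' ∈ cs ∧ '"' ∉ cs then '"' else '\''
  let body := cs.flatMap (fun c =>
    if c = '\\' then ['\\', '\\']
    else if c = q then ['\\', q]
    else if c = '\t' then ['\\', 't']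
    else [c])
  q :: body ++ [q]

def pyRepr (s : String) : String := String.ofList (pyReprChars s.toList)

-- the body of A's loop after `line.strip()` and the empty-line `continue`
def aCore (st : Option String × List String × List String) (line : String) :
    Option String × List String × List String :=
  let cm := st.1
  let extras := st.2.1
  let lst := st.2.2
  if PySem.Str.slice line (some 0) (some 1) = "[" ∧ PySem.Str.slice line (some (-1)) none = "]" then
    let cm0 := PySem.Str.slice line (some 1) (some (-1))
    if PySem.Str.isIn ":" cm0 then
      match PySem.Str.splitMax? cm0 ":" 1 with
      | some (extra :: markers :: _) =>
        if extra != "" then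
          (some ("(" ++ markers ++ ") and extra == " ++ pyRepr extra), PySem.Set.add extras extra, lst)
        else
          (some markers, extras, lst)
      | _ => (some "", extras, lst)  -- unreachable: split(":", 1) with ":" present yields two pieces
    else
      (some ("extra == " ++ pyRepr cm0), extras, lst)
  else
    match cm with  -- Python `if current_markers:` — truthy iff not None and not ""
    | some m => if m != "" then (cm, extras, lst ++ [line ++ "; " ++ m]) else (cm, extras, lst ++ [line])
    | none => (cm, extras, lst ++ [line])

def aStep (st : Option String × List String × List String) (raw : String) :
    Option String × List String × List String :=
  let line := PySem.Str.strip raw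
  if line = "" then st else aCore st line

def convert_sdist_requires (data : String) : List String × List String :=
  let r := (PySem.Str.splitlines data).foldl aStep (none, PySem.Set.empty, [])
  (r.2.2, r.2.1)

-- ===== PORT B =====
-- _section_marker(header): (markers, extra-or-None)
def markerExtra (h : String) : String × Option String :=
  if PySem.Str.isIn ":" h then
    match PySem.Str.splitMax? h ":" 1 with
    | some (extra :: markers :: _) =>
      if extra != "" then
        ("(" ++ markers ++ ") and extra == " ++ pyRepr extra, some extra)
      else
        (markers, none)
    | _ => ("", none)  -- unreachable: split(":", 1) with ":" present yields two pieces
  else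
    ("extra == " ++ pyRepr h, none)

-- phase 1 loop body: state (preamble, sections, current header, current body)
def bStep (st : List String × List (String × List String) × Option String × List String)
    (ln : String) : List String × List (String × List String) × Option String × List String :=
  if PySem.Str.startswith ln "[" ∧ PySem.Str.endswith ln "]" then
    match st.2.2.1 with
    | some h => (st.1, st.2.1 ++ [(h, st.2.2.2)], some (PySem.Str.slice ln (some 1) (some (-1))), [])
    | none => (st.1, st.2.1, some (PySem.Str.slice ln (some 1) (some (-1))), [])
  else if st.2.2.1 = none then
    (st.1 ++ [ln], st.2.1, st.2.2.1, st.2.2.2)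
  else
    (st.1, st.2.1, st.2.2.1, st.2.2.2 ++ [ln])

-- final flush of the open section
def flushB (secs : List (String × List String)) (hdr : Option String) (body : List String) :
    List (String × List String) :=
  match hdr with
  | some h => secs ++ [(h, body)]
  | none => secs

-- `if extra is not None: extras.add(extra)`
def pushExtra (extras : List String) : Option String → List String
  | some e => PySem.Set.add extras e
  | none => extras

-- phase 2 loop body: state (lst, extras)
def emitSection (acc : List String × List String) (sec : String × List String) :
    List String × List String :=
  let me := markerExtra sec.1
  (acc.1 ++ sec.2.map (fun ln => if me.1 != "" then ln ++ "; " ++ me.1 else ln),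
   pushExtra acc.2 me.2)

def convert_sdist_requires_alt (data : String) : List String × List String :=
  let lines := ((PySem.Str.splitlines data).map PySem.Str.strip).filter (fun s => s != "")
  let st := lines.foldl bStep ([], [], none, [])
  let secs := flushB st.2.1 st.2.2.1 st.2.2.2
  let p := secs.foldl emitSection (st.1, PySem.Set.empty)
  (p.1, p.2)

-- ===== PRECONDITION & SPEC =====
def Spec_convert_sdist_requires (data : String) (out : List String × List String) : Prop := out = convert_sdist_requires_alt data
instance (data : String) (out : List String × List String) : Decidable (Spec_convert_sdist_requires data out) := by unfold Spec_convert_sdist_requires; infer_instance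

-- ===== CLAIM (what is proved, stated in full; the proofs are below) =====
def Claim_equal_convert_sdist_requires : Prop := ∀ (data : String), Dom_convert_sdist_requires data → Spec_convert_sdist_requires data (convert_sdist_requires data)

-- ===== LEMMAS AND PROOFS =====

-- A's fold over the raw lines equals the core fold over the stripped non-empty lines
theorem foldl_aStep_eq (ls : List String) (st : Option String × List String × List String) :
    ls.foldl aStep st = ((ls.map PySem.Str.strip).filter (fun s => s != "")).foldl aCore st := by
  induction ls generalizing st with
  | nil => rfl
  | cons l ls ih =>
    simp only [List.foldl_cons, List.map_cons, List.filter_cons, aStep]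
    by_cases h : PySem.Str.strip l = "" <;> simp [h, ih]

-- A's header test coincides with B's startswith/endswith test
theorem header_cond_fst (s : String) :
    (PySem.Str.slice s (some 0) (some 1) = "[") ↔ (PySem.Str.startswith s "[" = true) := by
  rw [← String.toList_inj]
  have ht : PySem.List.slice s.toList none (some 1) = s.toList.take 1 :=
    PySem.List.slice_to s.toList (by norm_num)
  simp only [pysem, PySem.Chars.startswith_iff, List.prefix_iff_eq_take, ht]
  constructor <;> intro h <;> simp_all

theorem header_cond_snd (s : String) :
    (PySem.Str.slice s (some (-1)) none = "]") ↔ (PySem.Str.endswith s "]" = true) := by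
  rw [← String.toList_inj]
  simp only [pysem, PySem.Chars.endswith_iff, List.suffix_iff_eq_drop]
  constructor <;> intro h <;> simp_all

theorem header_cond_iff (s : String) :
    (PySem.Str.slice s (some 0) (some 1) = "[" ∧ PySem.Str.slice s (some (-1)) none = "]")
      ↔ (PySem.Str.startswith s "[" = true ∧ PySem.Str.endswith s "]" = true) :=
  and_congr (header_cond_fst s) (header_cond_snd s)

-- A's state rendered from B's phase-1 state
def renderB (st : List String × List (String × List String) × Option String × List String) :
    Option String × List String × List String :=
  let p := (flushB st.2.1 st.2.2.1 st.2.2.2).foldl emitSection (st.1, PySem.Set.empty)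
  (st.2.2.1.map (fun h => (markerExtra h).1), p.2, p.1)

def InvB (st : List String × List (String × List String) × Option String × List String) : Prop :=
  st.2.2.1 = none → st.2.1 = []

-- the header branch of A computes exactly B's marker/extra
theorem aCore_header (st : Option String × List String × List String) (ln : String)
    (hc : PySem.Str.slice ln (some 0) (some 1) = "[" ∧ PySem.Str.slice ln (some (-1)) none = "]") :
    aCore st ln = (some (markerExtra (PySem.Str.slice ln (some 1) (some (-1)))).1,
      pushExtra st.2.1 (markerExtra (PySem.Str.slice ln (some 1) (some (-1)))).2, st.2.2) := by
  unfold aCore markerExtra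
  rw [if_pos hc]
  by_cases hi : PySem.Chars.isIn [':'] (PySem.List.slice ln.toList (some 1) (some (-1))) = true
  · rcases hsp : PySem.Str.splitMax? (PySem.Str.slice ln (some 1) (some (-1))) ":" 1 with _ | pieces
    · simp [hi, hsp, pushExtra]
    · rcases pieces with _ | ⟨extra, _ | ⟨markers, rest⟩⟩
      · simp [hi, hsp, pushExtra]
      · simp [hi, hsp, pushExtra]
      · by_cases he : extra = "" <;> simp [hi, hsp, he, pushExtra]
  · simp [hi, pushExtra]

theorem step_commute (st : List String × List (String × List String) × Option String × List String)
    (ln : String) (hinv : InvB st) :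
    aCore (renderB st) ln = renderB (bStep st ln) := by
  obtain ⟨pre, secs, hdr, body⟩ := st
  by_cases hb : (PySem.Str.startswith ln "[" = true ∧ PySem.Str.endswith ln "]" = true)
  · have hc := (header_cond_iff ln).mpr hb
    unfold bStep
    rw [if_pos hb]
    cases hdr with
    | some h =>
      simp only [renderB, flushB, aCore_header _ _ hc]
      simp [List.foldl_append, emitSection]
    | none =>
      have hsecs : secs = [] := hinv rfl
      subst hsecs
      simp only [renderB, flushB, aCore_header _ _ hc]
      simp [emitSection]
  · have hc : ¬ (PySem.Str.slice ln (some 0) (some 1) = "[" ∧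
        PySem.Str.slice ln (some (-1)) none = "]") := fun h => hb ((header_cond_iff ln).mp h)
    unfold bStep
    rw [if_neg hb]
    cases hdr with
    | none =>
      have hsecs : secs = [] := hinv rfl
      subst hsecs
      unfold renderB flushB aCore
      rw [if_neg hc]
      simp
    | some h =>
      unfold renderB flushB aCore
      rw [if_neg hc]
      by_cases hm : (markerExtra h).1 = "" <;>
        simp [hm, List.foldl_append, emitSection, List.map_append]

theorem invB_preserved (st : List String × List (String × List String) × Option String × List String)
    (ln : String) (hinv : InvB st) : InvB (bStep st ln) := by
  obtain ⟨pre, secs, hdr, body⟩ := st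
  unfold bStep InvB
  split
  · cases hdr <;> simp
  · split <;> simp_all [InvB]

theorem fold_commute (ls : List String)
    (st : List String × List (String × List String) × Option String × List String) (hinv : InvB st) :
    ls.foldl aCore (renderB st) = renderB (ls.foldl bStep st) := by
  induction ls generalizing st with
  | nil => rfl
  | cons l ls ih =>
    simp only [List.foldl_cons, step_commute st l hinv]
    exact ih _ (invB_preserved st l hinv)

-- ===== VERDICT (by name: the statement is the Claim_ definition above) =====
theorem convert_sdist_requires_spec : Claim_equal_convert_sdist_requires := by
  intro data _
  unfold Spec_convert_sdist_requires convert_sdist_requires convert_sdist_requires_alt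
  rw [foldl_aStep_eq]
  have h0 : (none, PySem.Set.empty, ([] : List String)) = renderB ([], [], none, []) := rfl
  rw [h0, fold_commute _ _ (fun _ => rfl)]
  rfl
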